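-- pv_equiv track=rewrite | github.com/jmoreno-labelbox/apollo-tau-bench | tau/tau_bench/envs/rbac_3/tools.py | _check_policy_exceptions
-- ===== SOURCE A (Python) =====
-- from typing import Any
--
-- _HARD_TS = "2024-06-26 16:05:00+00:00"
--
-- def _check_policy_exceptions(
--     data: dict[str, Any], user_id: str, role_id: str, resource_id: str
-- ) -> bool:
--     """Verify for active policy exceptions concerning the user/permission combination."""
--     pass
--     #Retrieve permissions for the specified role
--     role_permissions = [
--         rp.get("permission_id")
--         for rp in data.get("role_permissions", [])
--         if rp.get("role_id") == role_id
--     ]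
--
--     #Verify if the user has current policy exceptions for any of these permissions
--     for perm_id in role_permissions:
--         exception = next(
--             (
--                 pe
--                 for pe in data.get("policy_exceptions", [])
--                 if (
--                     pe.get("user_id") == user_id
--                     and pe.get("permission_id") == perm_id
--                     and pe.get("status") == "APPROVED"
--                     and (
--                         pe.get("expires_on") is None
--                         or pe.get("expires_on") > _HARD_TS
--                     )
--                 )
--             ),
--             None,
--         )
--         if exception:
--             return True
--     return False
-- ===== SOURCE B (Python) =====
-- _HARD_TS = "2024-06-26 16:05:00+00:00"
--
-- def _check_policy_exceptions(data, user_id, role_id, resource_id):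
--     # Build an index of the role's permissions once, then make a single
--     # early-exit pass over policy_exceptions (the loop nesting of A is swapped).
--     role_perms = set()
--     for rp in data.get("role_permissions", []):
--         if rp.get("role_id") == role_id:
--             role_perms.add(rp.get("permission_id"))
--     for pe in data.get("policy_exceptions", []):
--         if (pe.get("user_id") == user_id
--                 and pe.get("status") == "APPROVED"
--                 and (pe.get("expires_on") is None or pe.get("expires_on") > _HARD_TS)
--                 and pe.get("permission_id") in role_perms):
--             return True
--     return False
-- ===== Notes on version B (the rewrite author's own statement) =====
-- stated objective: alternative
-- what changed: Swaps A's loop nesting: instead of scanning all policy_exceptions once per role permission (next(...) inside a loop over role_permissions), B builds a set index of the role's permissions in one pass and then makes a single early-exit pass over policy_exceptions testing membership in that index.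
import Mathlib
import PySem

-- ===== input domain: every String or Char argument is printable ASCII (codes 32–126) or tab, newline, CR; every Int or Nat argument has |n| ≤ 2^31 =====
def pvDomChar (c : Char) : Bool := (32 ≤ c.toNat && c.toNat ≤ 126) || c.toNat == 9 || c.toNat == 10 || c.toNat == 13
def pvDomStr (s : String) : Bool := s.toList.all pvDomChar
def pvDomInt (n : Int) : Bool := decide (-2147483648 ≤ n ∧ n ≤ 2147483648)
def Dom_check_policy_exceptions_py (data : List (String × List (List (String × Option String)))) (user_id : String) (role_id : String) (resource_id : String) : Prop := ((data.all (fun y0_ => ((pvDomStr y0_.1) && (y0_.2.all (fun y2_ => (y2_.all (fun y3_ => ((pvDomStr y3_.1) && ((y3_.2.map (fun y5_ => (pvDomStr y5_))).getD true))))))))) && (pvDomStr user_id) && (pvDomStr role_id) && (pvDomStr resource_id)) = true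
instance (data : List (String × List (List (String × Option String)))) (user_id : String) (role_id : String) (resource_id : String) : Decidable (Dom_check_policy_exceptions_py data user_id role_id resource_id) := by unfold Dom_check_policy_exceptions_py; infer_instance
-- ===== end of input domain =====

-- B swaps A's loop nesting: a set index of the role's permissions is built in one pass,
-- then a single early-exit scan over policy_exceptions tests membership; objective: alternative.

-- shared helper: Python's d.get(k) on a dict whose values are Option String (d.get(k) is None both
-- when k is absent and when it maps to None)
def pvGet (d : List (String × Option String)) (k : String) : Option String :=
  PySem.Dict.getD (PySem.Dict.mk d) k none

def pvHardTS : String := "2024-06-26 16:05:00+00:00"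

-- ===== PORT A =====
-- the predicate of A's `next(... )` generator
def pvPeMatch (user_id : String) (perm_id : Option String) (pe : List (String × Option String)) : Bool :=
  pvGet pe "user_id" == some user_id &&
  pvGet pe "permission_id" == perm_id &&
  pvGet pe "status" == some "APPROVED" &&
  (match pvGet pe "expires_on" with
   | none => true
   | some e => decide (pvHardTS < e))   -- Python's str '>' is code-point lexicographic = Lean's '<' on ASCII

def check_policy_exceptions_py (data : List (String × List (List (String × Option String)))) (user_id : String) (role_id : String) (resource_id : String) : Bool :=
  let role_permissions :=
    ((PySem.Dict.getD (PySem.Dict.mk data) "role_permissions" []).filter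
      (fun rp => pvGet rp "role_id" == some role_id)).map (fun rp => pvGet rp "permission_id")
  role_permissions.any (fun perm_id =>
    match (PySem.Dict.getD (PySem.Dict.mk data) "policy_exceptions" []).find?
            (pvPeMatch user_id perm_id) with
    | some pe => !pe.isEmpty   -- Python's `if exception:` — truthiness of the found dict
    | none => false)

-- ===== PORT B =====
-- first loop of Source B: fold the role_permissions rows into a set of the role's permission ids
def pvRoleIndex (role_id : String) (rps : List (List (String × Option String))) :
    PySem.Set (Option String) :=
  rps.foldl
    (fun s rp =>
      if pvGet rp "role_id" == some role_id then PySem.Set.add s (pvGet rp "permission_id") else s)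
    PySem.Set.empty

-- the `if` condition of Source B's second loop
def pvExcOK (user_id : String) (rperms : PySem.Set (Option String))
    (pe : List (String × Option String)) : Bool :=
  pvGet pe "user_id" == some user_id &&
  pvGet pe "status" == some "APPROVED" &&
  (match pvGet pe "expires_on" with
   | none => true
   | some e => decide (pvHardTS < e)) &&
  PySem.Set.contains rperms (pvGet pe "permission_id")

-- second loop of Source B: early-exit scan over policy_exceptions
def pvScanPE (user_id : String) (rperms : PySem.Set (Option String)) :
    List (List (String × Option String)) → Bool
  | [] => false
  | pe :: rest => if pvExcOK user_id rperms pe then true else pvScanPE user_id rperms rest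

def check_policy_exceptions_py_alt (data : List (String × List (List (String × Option String)))) (user_id : String) (role_id : String) (resource_id : String) : Bool :=
  pvScanPE user_id
    (pvRoleIndex role_id (PySem.Dict.getD (PySem.Dict.mk data) "role_permissions" []))
    (PySem.Dict.getD (PySem.Dict.mk data) "policy_exceptions" [])

-- ===== PRECONDITION & SPEC =====
def Spec_check_policy_exceptions_py (data : List (String × List (List (String × Option String)))) (user_id : String) (role_id : String) (resource_id : String) (out : Bool) : Prop := out = check_policy_exceptions_py_alt data user_id role_id resource_id
instance (data : List (String × List (List (String × Option String)))) (user_id : String) (role_id : String) (resource_id : String) (out : Bool) : Decidable (Spec_check_policy_exceptions_py data user_id role_id resource_id out) := by unfold Spec_check_policy_exceptions_py; infer_instance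

-- ===== CLAIM =====
def Claim_equal_check_policy_exceptions_py : Prop := ∀ (data : List (String × List (List (String × Option String)))) (user_id : String) (role_id : String) (resource_id : String), Dom_check_policy_exceptions_py data user_id role_id resource_id → Spec_check_policy_exceptions_py data user_id role_id resource_id (check_policy_exceptions_py data user_id role_id resource_id)

-- ===== LEMMAS AND PROOFS =====

-- a matching exception dict cannot be empty (it holds a "user_id" entry), so Python's
-- truthiness test `if exception:` is equivalent to find? returning some
theorem pvPeMatch_ne_nil (u : String) (p : Option String) (pe : List (String × Option String))
    (h : pvPeMatch u p pe = true) : pe ≠ [] := by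
  intro hnil
  subst hnil
  simp [pvPeMatch, pvGet, PySem.Dict.getD, PySem.Dict.get?] at h

-- A's inner find?-then-truthiness step, as an existential
theorem pvFindTruthy (u : String) (p : Option String) (PE : List (List (String × Option String))) :
    (match PE.find? (pvPeMatch u p) with
     | some pe => !pe.isEmpty
     | none => false) = true ↔ ∃ pe ∈ PE, pvPeMatch u p pe = true := by
  cases hf : PE.find? (pvPeMatch u p) with
  | none =>
    simp only [List.find?_eq_none] at hf
    constructor
    · intro h; simp at h
    · rintro ⟨pe, hm, hp⟩; exact absurd hp (by simpa using hf pe hm)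
  | some pe =>
    have hmem := List.mem_of_find?_eq_some hf
    have hpred := List.find?_some hf
    have hne := pvPeMatch_ne_nil _ _ _ hpred
    constructor
    · intro _; exact ⟨pe, hmem, hpred⟩
    · intro _; simp [hne]

-- B's per-exception test decomposed into A's match predicate plus a membership
theorem pvExcOK_iff (u : String) (R : PySem.Set (Option String))
    (pe : List (String × Option String)) :
    pvExcOK u R pe = true ↔
      pvPeMatch u (pvGet pe "permission_id") pe = true ∧ pvGet pe "permission_id" ∈ R := by
  simp only [pvExcOK, pvPeMatch, Bool.and_eq_true, beq_iff_eq, PySem.Set.contains_iff]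
  tauto

-- membership in the role index built by B's first loop
theorem mem_pvRoleIndex (role_id : String) (x : Option String)
    (rps : List (List (String × Option String))) :
    x ∈ pvRoleIndex role_id rps ↔
      ∃ rp ∈ rps, (pvGet rp "role_id" == some role_id) = true ∧ x = pvGet rp "permission_id" := by
  have H : ∀ (l : List (List (String × Option String))) (s : PySem.Set (Option String)),
      x ∈ l.foldl
        (fun s rp =>
          if pvGet rp "role_id" == some role_id then PySem.Set.add s (pvGet rp "permission_id") else s) s
      ↔ x ∈ s ∨ ∃ rp ∈ l, (pvGet rp "role_id" == some role_id) = true ∧ x = pvGet rp "permission_id" := by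
    intro l
    induction l with
    | nil => intro s; simp
    | cons rp rest ih =>
      intro s
      simp only [List.foldl_cons]
      by_cases h : (pvGet rp "role_id" == some role_id) = true
      · rw [if_pos h, ih, PySem.Set.mem_add]
        constructor
        · rintro (⟨hs | rfl⟩ | ⟨rp', h1, h2, h3⟩)
          · exact Or.inl hs
          · exact Or.inr ⟨rp, List.mem_cons_self, h, rfl⟩
          · exact Or.inr ⟨rp', List.mem_cons_of_mem _ h1, h2, h3⟩
        · rintro (hs | ⟨rp', h1, h2, h3⟩)
          · exact Or.inl (Or.inl hs)
          · rcases List.mem_cons.mp h1 with rfl | h1'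
            · exact Or.inl (Or.inr h3)
            · exact Or.inr ⟨rp', h1', h2, h3⟩
      · rw [if_neg h, ih]
        constructor
        · rintro (hs | ⟨rp', h1, h2, h3⟩)
          · exact Or.inl hs
          · exact Or.inr ⟨rp', List.mem_cons_of_mem _ h1, h2, h3⟩
        · rintro (hs | ⟨rp', h1, h2, h3⟩)
          · exact Or.inl hs
          · rcases List.mem_cons.mp h1 with rfl | h1'
            · exact absurd h2 h
            · exact Or.inr ⟨rp', h1', h2, h3⟩
  rw [pvRoleIndex, H]
  simp [PySem.Set.empty]

-- B's early-exit scan, as an existential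
theorem pvScanPE_iff (u : String) (R : PySem.Set (Option String))
    (l : List (List (String × Option String))) :
    pvScanPE u R l = true ↔ ∃ pe ∈ l, pvExcOK u R pe = true := by
  induction l with
  | nil => simp [pvScanPE]
  | cons pe rest ih =>
    rw [pvScanPE]
    by_cases h : pvExcOK u R pe = true
    · simp [h]
    · rw [if_neg h, ih]
      constructor
      · rintro ⟨pe', h1, h2⟩; exact ⟨pe', List.mem_cons_of_mem _ h1, h2⟩
      · rintro ⟨pe', h1, h2⟩
        rcases List.mem_cons.mp h1 with rfl | h1'
        · exact absurd h2 h
        · exact ⟨pe', h1', h2⟩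

theorem check_policy_exceptions_py_spec : Claim_equal_check_policy_exceptions_py := by
  intro data user_id role_id resource_id _
  unfold Spec_check_policy_exceptions_py
  unfold check_policy_exceptions_py check_policy_exceptions_py_alt
  set RP := (PySem.Dict.getD (PySem.Dict.mk data) "role_permissions" []) with hRP
  set PE := (PySem.Dict.getD (PySem.Dict.mk data) "policy_exceptions" []) with hPE
  rw [Bool.eq_iff_iff, pvScanPE_iff]
  simp only [List.any_eq_true, List.mem_map, List.mem_filter, pvFindTruthy, pvExcOK_iff,
    mem_pvRoleIndex]
  constructor
  · rintro ⟨p, ⟨rp, ⟨hrpmem, hrole⟩, rfl⟩, pe, hpemem, hmatch⟩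
    have hperm : pvGet pe "permission_id" = pvGet rp "permission_id" := by
      have := hmatch
      simp only [pvPeMatch, Bool.and_eq_true, beq_iff_eq] at this
      exact this.1.1.2
    refine ⟨pe, hpemem, ?_, rp, hrpmem, hrole, hperm⟩
    rw [hperm]; exact hmatch
  · rintro ⟨pe, hpemem, hmatch, rp, hrpmem, hrole, hperm⟩
    refine ⟨pvGet rp "permission_id", ⟨rp, ⟨hrpmem, hrole⟩, rfl⟩, pe, hpemem, ?_⟩
    rw [← hperm]; exact hmatch

-- ===== VERDICT (by name: the statement is the Claim_ definition above) =====
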